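-- pv_equiv track=rewrite | github.com/P-C-R-P/Paralanguage-Encoder | main.py | backtrack
-- ===== SOURCE A (Python) =====
-- def backtrack(rest, current, combinations):
--     # If there are no spans left in the list:
--     if not rest:
--         # Then append entire combination to list of possible combinations:
--         combinations.append(current[:])
--         # Return to exit recursive backtracking process:
--         return
--     # Assign first span in list of remaining spans to start and end variables:
--     start, end = rest[0]
--     # Loop over possible values from start and end:
--     for i in range(start + 1, end + 1):
--         # Append given span in range x to y, to form part of combination of spans, to current combination:
--         current.append([start, i])
--         # Backtrack in cases where there are remaining spans in list to find rest of span combinations: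
--         backtrack(rest[1:], current, combinations)
--         # Removes final combination in order to find next possible combination:
--         current.pop()
--     # Return combinations found from backtracking process:
--     return combinations
-- ===== SOURCE B (Python) =====
-- def backtrack(rest, current, combinations):
--     # Base case kept verbatim: record the finished combination and return None.
--     if not rest:
--         combinations.append(current[:])
--         return
--     # Iterative Cartesian product: grow the list of partial combinations one span at a time.
--     prefixes = [current]
--     for start, end in rest:
--         prefixes = [p + [[start, i]] for p in prefixes for i in range(start + 1, end + 1)]
--     combinations.extend(prefixes)
--     return combinations
-- ===== Notes on version B (the rewrite author's own statement) =====
-- stated objective: alternative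
-- what changed: Replaces the recursive backtracking with mutation (append/recurse/pop) by a single iterative fold that grows the list of partial combinations span by span (an iterative Cartesian product), then extends combinations once.
-- outside the precondition, e.g. on backtrack([], [], []): A returns None, B returns None; on backtrack([[1, 1], [1, 2, 3]], [], []): A returns [], B raises ValueError
import Mathlib
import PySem

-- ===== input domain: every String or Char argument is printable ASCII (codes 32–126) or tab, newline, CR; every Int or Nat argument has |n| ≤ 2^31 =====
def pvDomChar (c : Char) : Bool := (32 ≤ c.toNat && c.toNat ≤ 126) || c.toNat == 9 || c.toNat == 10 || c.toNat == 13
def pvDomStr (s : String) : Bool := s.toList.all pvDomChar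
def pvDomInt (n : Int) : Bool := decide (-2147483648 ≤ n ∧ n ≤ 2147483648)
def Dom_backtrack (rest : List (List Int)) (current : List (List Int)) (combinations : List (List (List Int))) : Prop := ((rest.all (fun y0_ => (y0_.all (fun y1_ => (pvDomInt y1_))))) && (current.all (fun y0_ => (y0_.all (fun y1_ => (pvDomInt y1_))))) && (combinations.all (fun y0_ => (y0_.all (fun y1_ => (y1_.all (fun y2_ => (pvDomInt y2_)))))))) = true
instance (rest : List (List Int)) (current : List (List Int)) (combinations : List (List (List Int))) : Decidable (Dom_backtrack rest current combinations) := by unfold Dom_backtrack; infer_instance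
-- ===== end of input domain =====

-- ===== PORT A =====
-- Literal transliteration of A's recursive backtracking. Python A RETURNS None when rest = []
-- (hence rest = [] is outside Pre_); the value here models combinations after the append.
-- A span that is not a 2-list raises ValueError at 'start, end = rest[0]' in Python (outside Pre_);
-- the catch-all branch returns combinations unchanged there.
def backtrack (rest : List (List Int)) (current : List (List Int)) (combinations : List (List (List Int))) : List (List (List Int)) :=
  match rest with
  | [] => combinations ++ [current]
  | span :: tail =>
    match span with
    | [s, e] =>
      -- for i in range(start+1, end+1): current.append([start,i]); backtrack(rest[1:], current, combinations); current.pop()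
      (PySem.List.pyRange (s + 1) (e + 1) 1).foldl
        (fun combs i => backtrack tail (current ++ [[s, i]]) combs) combinations
    | _ => combinations

-- ===== PORT B =====
-- One fold step of B: extend every partial combination by every choice for this span.
-- A span that is not a 2-list raises ValueError in Python B (outside Pre_); catch-all keeps ps.
def stepB (ps : List (List (List Int))) (span : List Int) : List (List (List Int)) :=
  if span.length = 2 then
    let s := span.getD 0 0
    let e := span.getD 1 0
    ps.flatMap (fun p => (PySem.List.pyRange (s + 1) (e + 1) 1).map (fun i => p ++ [[s, i]]))
  else ps

-- Port of B: iterative Cartesian product, then one extend. Python B returns None when rest = []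
-- (outside Pre_); the value here models combinations after the append.
def backtrack_alt (rest : List (List Int)) (current : List (List Int)) (combinations : List (List (List Int))) : List (List (List Int)) :=
  if rest.isEmpty then combinations ++ [current]
  else combinations ++ rest.foldl stepB [current]

-- ===== PRECONDITION & SPEC =====
-- Pre_ excludes rest = [] (Python A returns None there, not a list) and any rest containing a span
-- that is not a 2-list (A raises ValueError when it reaches it; when an earlier empty range makes it
-- unreachable A returns combinations unchanged while B, which scans all spans eagerly, raises).
def Pre_backtrack (rest : List (List Int)) (current : List (List Int)) (combinations : List (List (List Int))) : Prop :=
  rest ≠ [] ∧ ∀ s ∈ rest, s.length = 2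
instance (rest : List (List Int)) (current : List (List Int)) (combinations : List (List (List Int))) : Decidable (Pre_backtrack rest current combinations) := by unfold Pre_backtrack; infer_instance
def pvWitness_backtrack : List (List Int) × List (List Int) × List (List (List Int)) := ([[0, 2], [5, 7]], [[1, 1]], [])
def Spec_backtrack (rest : List (List Int)) (current : List (List Int)) (combinations : List (List (List Int))) (out : List (List (List Int))) : Prop := out = backtrack_alt rest current combinations
instance (rest : List (List Int)) (current : List (List Int)) (combinations : List (List (List Int))) (out : List (List (List Int))) : Decidable (Spec_backtrack rest current combinations out) := by unfold Spec_backtrack; infer_instance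

-- ===== CLAIM (what is proved, stated in full; the proofs are below) =====
def Claim_equal_backtrack : Prop := ∀ (rest : List (List Int)) (current : List (List Int)) (combinations : List (List (List Int))), Dom_backtrack rest current combinations → Pre_backtrack rest current combinations → Spec_backtrack rest current combinations (backtrack rest current combinations)

-- ===== LEMMAS AND PROOFS =====

lemma stepB_append (ps qs : List (List (List Int))) (span : List Int) :
    stepB (ps ++ qs) span = stepB ps span ++ stepB qs span := by
  unfold stepB
  split <;> simp

lemma stepB_nil (span : List Int) : stepB [] span = [] := by
  unfold stepB
  split <;> simp

lemma foldl_stepB_nil (rest : List (List Int)) : rest.foldl stepB [] = [] := by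
  induction rest with
  | nil => rfl
  | cons span tail ih => simp [List.foldl, stepB_nil, ih]

lemma foldl_stepB_append (rest : List (List Int)) (ps qs : List (List (List Int))) :
    rest.foldl stepB (ps ++ qs) = rest.foldl stepB ps ++ rest.foldl stepB qs := by
  induction rest generalizing ps qs with
  | nil => rfl
  | cons span tail ih => simp [List.foldl, stepB_append, ih]

lemma foldl_stepB_flatMap (rest : List (List Int)) (ps : List (List (List Int))) :
    rest.foldl stepB ps = ps.flatMap (fun p => rest.foldl stepB [p]) := by
  induction ps with
  | nil => simp [foldl_stepB_nil]
  | cons p ps ih =>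
    have h := foldl_stepB_append rest [p] ps
    simpa [ih] using h

-- A's recursion computes exactly "old combinations ++ the fold of B's step starting from [current]".
lemma backtrack_eq_fold (rest : List (List Int)) (current : List (List Int)) (combinations : List (List (List Int)))
    (h : ∀ s ∈ rest, s.length = 2) :
    backtrack rest current combinations = combinations ++ rest.foldl stepB [current] := by
  induction rest generalizing current combinations with
  | nil => simp [backtrack]
  | cons span tail ih =>
    obtain ⟨s, e, rfl⟩ : ∃ s e, span = [s, e] := by
      have hl := h span (by simp)
      match span, hl with
      | [s, e], _ => exact ⟨s, e, rfl⟩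
    have htail : ∀ x ∈ tail, x.length = 2 := fun x hx => h x (by simp [hx])
    have hf : (fun (combs : List (List (List Int))) (i : Int) =>
          backtrack tail (current ++ [[s, i]]) combs)
        = (fun combs i => combs ++ tail.foldl stepB [current ++ [[s, i]]]) :=
      funext fun combs => funext fun i => ih (current ++ [[s, i]]) combs htail
    calc backtrack ([s, e] :: tail) current combinations
        = (PySem.List.pyRange (s + 1) (e + 1) 1).foldl
            (fun combs i => backtrack tail (current ++ [[s, i]]) combs) combinations := by
          simp [backtrack]
      _ = (PySem.List.pyRange (s + 1) (e + 1) 1).foldl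
            (fun combs i => combs ++ tail.foldl stepB [current ++ [[s, i]]]) combinations := by
          rw [hf]
      _ = combinations ++ (PySem.List.pyRange (s + 1) (e + 1) 1).flatMap
            (fun i => tail.foldl stepB [current ++ [[s, i]]]) :=
          PySem.List.foldl_append_eq_flatMap _ _ _
      _ = combinations ++ ([s, e] :: tail).foldl stepB [current] := by
          simp [List.foldl, stepB, foldl_stepB_flatMap tail
            ((PySem.List.pyRange (s + 1) (e + 1) 1).map (fun i => current ++ [[s, i]])),
            List.flatMap_map]

-- ===== VERDICT (by name: the statement is the Claim_ definition above) =====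
theorem backtrack_spec : Claim_equal_backtrack := by
  intro rest current combinations _hdom hpre
  obtain ⟨hne, hlen⟩ := hpre
  unfold Spec_backtrack
  match rest, hne with
  | span :: tail, _ =>
    rw [backtrack_eq_fold (span :: tail) current combinations hlen]
    rfl
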